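-- pv_equiv track=rewrite | github.com/Melevener/University-Assigments | University/2 Курс/4 семестр/СИАКОД(структуры и алгоритмы компьютерной обработки данных) ч.1/Лабораторные работы/Lab1/Task1_no_recursion.py | f
-- ===== SOURCE A (Python) =====
-- def f(start, end):
--     res_mult = 1
--     first_value = 1
--     while start != end:
--         if first_value == 1:
--             start += 3
--             res_mult = res_mult * start
--             first_value += 1
--         else:
--             start += 4
--             res_mult = res_mult * start
--     return res_mult
-- ===== SOURCE B (Python) =====
-- def f(start, end):
--     # Product of the arithmetic-step sequence start+3, start+7, start+11, ... up to end,
--     # computed by balanced divide-and-conquer (binary splitting) over the term count.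
--     if start == end:
--         return 1
--     n = (end - start - 3) // 4 + 1  # number of terms
--
--     def prod(first, n):
--         # product of n terms first, first+4, ..., first+4*(n-1)
--         if n == 1:
--             return first
--         half = n // 2
--         return prod(first, half) * prod(first + 4 * half, n - half)
--
--     return prod(start + 3, n)
-- ===== Notes on version B (the rewrite author's own statement) =====
-- stated objective: faster
-- what changed: Replaces A's sequential left-to-right while-loop product with a balanced divide-and-conquer (binary-splitting) product over the closed-form term count, so big-integer factors are multiplied in a balanced tree instead of one ever-growing accumulator.
import Mathlib
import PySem

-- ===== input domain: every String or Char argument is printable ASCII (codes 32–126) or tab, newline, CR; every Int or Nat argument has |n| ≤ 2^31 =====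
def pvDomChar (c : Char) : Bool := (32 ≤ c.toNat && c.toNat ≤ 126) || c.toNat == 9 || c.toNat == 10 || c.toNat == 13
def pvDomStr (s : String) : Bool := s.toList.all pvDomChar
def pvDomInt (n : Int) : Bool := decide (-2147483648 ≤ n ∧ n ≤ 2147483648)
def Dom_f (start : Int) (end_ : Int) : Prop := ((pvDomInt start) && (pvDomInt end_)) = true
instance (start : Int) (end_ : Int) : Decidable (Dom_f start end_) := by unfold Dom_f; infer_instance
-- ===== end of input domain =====

-- B replaces A's sequential accumulator product with a balanced divide-and-conquer
-- (binary-splitting) product over the closed-form term count (objective: faster).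

-- ===== PORT A =====
-- A's while-loop, fueled: the fuel (end_ - start).toNat + 1 bounds the number of
-- iterations on every input where the Python loop terminates (Pre_f), so the port
-- is exact there; outside Pre_f the Python diverges.
def fLoop : Nat → Int → Int → Int → Int → Int
  | 0, _, _, res, _ => res
  | fuel + 1, start, end_, res, fv =>
    if start = end_ then res
    else if fv = 1 then fLoop fuel (start + 3) end_ (res * (start + 3)) (fv + 1)
    else fLoop fuel (start + 4) end_ (res * (start + 4)) fv

def f (start : Int) (end_ : Int) : Int :=
  fLoop ((end_ - start).toNat + 1) start end_ 1 1

-- ===== PORT B =====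
-- product of n terms first, first+4, ..., first+4*(n-1).
-- The 'n ≤ 1' guard (Python: 'n == 1') only makes the recursion total: every call
-- made by f_alt under Pre_f has n ≥ 1, where it coincides with Python's base case.
def bProd (first : Int) (n : Int) : Int :=
  if _h : n ≤ 1 then first
  else
    let half := PySem.Int.floordiv n 2
    bProd first half * bProd (first + 4 * half) (n - half)
termination_by n.toNat
decreasing_by
  all_goals
    simp only [PySem.Int.floordiv_eq_ediv_of_pos (show (0:Int) < 2 by omega)]
    omega

def f_alt (start : Int) (end_ : Int) : Int :=
  if start = end_ then 1
  else
    let n := PySem.Int.floordiv (end_ - start - 3) 4 + 1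
    bProd (start + 3) n

-- ===== PRECONDITION & SPEC =====
-- Pre_f = exactly the inputs on which A's while loop terminates (end equals start,
-- or end is reached from start by one +3 step and then +4 steps); elsewhere A diverges.
def Pre_f (start : Int) (end_ : Int) : Prop :=
  end_ = start ∨ (start + 3 ≤ end_ ∧ (end_ - start) % 4 = 3)
instance (start : Int) (end_ : Int) : Decidable (Pre_f start end_) := by
  unfold Pre_f; infer_instance

def pvWitness_f : Int × Int := (2, 13)

def Spec_f (start : Int) (end_ : Int) (out : Int) : Prop := out = f_alt start end_
instance (start : Int) (end_ : Int) (out : Int) : Decidable (Spec_f start end_ out) := by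
  unfold Spec_f; infer_instance

-- ===== CLAIM (what is proved, stated in full; the proofs are below) =====
def Claim_equal_f : Prop :=
  ∀ (start : Int) (end_ : Int), Dom_f start end_ → Pre_f start end_ →
    Spec_f start end_ (f start end_)

-- ===== LEMMAS AND PROOFS =====

-- Reference product: pRef s m = (s+4) * (s+8) * ... * (s+4m).
def pRef (s : Int) : Nat → Int
  | 0 => 1
  | m + 1 => (s + 4) * pRef (s + 4) m

lemma pRef_split (m : Nat) : ∀ (s : Int) (k : Nat),
    pRef s (m + k) = pRef s m * pRef (s + 4 * m) k := by
  induction m with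
  | zero => intro s k; simp [pRef]
  | succ m ih =>
    intro s k
    have : m + 1 + k = (m + k) + 1 := by omega
    rw [this]
    simp only [pRef, ih (s + 4) k, push_cast, Nat.cast_add, Nat.cast_one]
    ring_nf

lemma fLoop_eq_pRef (m : Nat) : ∀ (fuel : Nat) (s res : Int), m ≤ fuel →
    fLoop fuel s (s + 4 * m) res 2 = res * pRef s m := by
  induction m with
  | zero =>
    intro fuel s res _
    cases fuel with
    | zero => simp [fLoop, pRef]
    | succ fu => simp [fLoop, pRef]
  | succ m ih =>
    intro fuel s res hle
    cases fuel with
    | zero => omega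
    | succ fu =>
      have hne : s ≠ s + 4 * ((m : Int) + 1) := by omega
      have harg : s + 4 * ((m : Int) + 1) = (s + 4) + 4 * (m : Int) := by ring
      simp only [fLoop, Nat.cast_add, Nat.cast_one, if_neg hne]
      norm_num
      rw [harg, ih fu (s + 4) (res * (s + 4)) (by omega)]
      simp [pRef, mul_assoc]

lemma bProd_eq_pRef (m : Nat) : ∀ (first : Int), bProd first (m + 1) = pRef (first - 4) (m + 1) := by
  induction m using Nat.strong_induction_on with
  | _ m ih =>
    intro first
    rcases Nat.eq_zero_or_pos m with hm | hm
    · subst hm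
      rw [bProd]
      simp [pRef]
    · rw [bProd]
      rw [dif_neg (by omega)]
      have hh : PySem.Int.floordiv ((m : Int) + 1) 2 = (((m + 1) / 2 : Nat) : Int) := by
        rw [show ((m : Int) + 1) = ((m + 1 : Nat) : Int) by push_cast; ring]
        exact_mod_cast PySem.Int.floordiv_natCast (m + 1) 2
      set h : Nat := (m + 1) / 2 with hhdef
      have h1 : 1 ≤ h := by omega
      have h2 : h ≤ m := by omega
      rw [hh]
      have key1 : bProd first (h : Int) = pRef (first - 4) h := by
        rw [show ((h : Int)) = ((h - 1 : Nat) : Int) + 1 by push_cast [Nat.cast_sub h1]; ring,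
            ih (h - 1) (by omega) first, show (h - 1) + 1 = h by omega]
      have key2 : bProd (first + 4 * (h : Int)) ((m : Int) + 1 - (h : Int))
          = pRef (first + 4 * (h : Int) - 4) (m + 1 - h) := by
        rw [show ((m : Int) + 1 - (h : Int)) = ((m - h : Nat) : Int) + 1 by
              push_cast [Nat.cast_sub h2]; ring,
            ih (m - h) (by omega) (first + 4 * (h : Int)),
            show (m - h) + 1 = m + 1 - h by omega]
      show bProd first (h : Int) * bProd (first + 4 * (h : Int)) ((m : Int) + 1 - (h : Int))
          = pRef (first - 4) (m + 1)
      rw [key1, key2, show first + 4 * (h : Int) - 4 = (first - 4) + 4 * (h : Int) by ring]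
      have hs := pRef_split h (first - 4) (m + 1 - h)
      rw [show h + (m + 1 - h) = m + 1 by omega] at hs
      rw [hs]

lemma fLoop_first (fuel : Nat) (s e : Int) (hne : s ≠ e) :
    fLoop (fuel + 1) s e 1 1 = fLoop fuel (s + 3) e (s + 3) 2 := by
  simp [fLoop, hne]

-- ===== VERDICT (by name: the statement is the Claim_ definition above) =====
theorem f_spec : Claim_equal_f := by
  intro start end_ _ hpre
  unfold Spec_f f f_alt
  rcases hpre with h | ⟨hle, hmod⟩
  · subst h
    simp [fLoop]
  · have hne : start ≠ end_ := by omega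
    -- end_ = start + 3 + 4*k for k = (end_ - start - 3)/4 ≥ 0
    have hdvd : (4 : Int) ∣ (end_ - start - 3) := by omega
    obtain ⟨k, hk⟩ := hdvd
    have hk0 : 0 ≤ k := by omega
    obtain ⟨m, hm⟩ := Int.eq_ofNat_of_zero_le hk0
    have hend : end_ = (start + 3) + 4 * (m : Int) := by omega
    have hfuel : (end_ - start).toNat + 1 = ((end_ - start).toNat) + 1 := rfl
    have hfuelge : m ≤ (end_ - start).toNat := by omega
    -- A side
    have hA : fLoop ((end_ - start).toNat + 1) start end_ 1 1
        = (start + 3) * pRef (start + 3) m := by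
      rw [show (end_ - start).toNat + 1 = ((end_ - start).toNat - 1 + 1) + 1 by omega,
          fLoop_first _ _ _ hne, hend,
          fLoop_eq_pRef m ((start + 3 + 4 * (m : Int) - start).toNat - 1 + 1)
            (start + 3) (start + 3) (by omega)]
    rw [hA, if_neg hne]
    -- B side
    have hfd : PySem.Int.floordiv (end_ - start - 3) 4 + 1 = (m : Int) + 1 := by
      rw [PySem.Int.floordiv_eq_ediv_of_pos (by omega)]
      omega
    simp only [hfd]
    rw [bProd_eq_pRef m (start + 3)]
    simp [pRef]
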